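-- pv_equiv track=rewrite | github.com/zapatacomputing/z-quantum-core | src/python/zquantum/core/circuit/_utils.py | create_list_of_full_weight_paulis
-- ===== SOURCE A (Python) =====
-- def create_list_of_full_weight_paulis(number_of_qubits):
--
--     """Creates a list of Pauli strings for a specified qubit number
--
--     Args:
--         number_of_qubits: number of qubits
--
--
--     Return:
--         pauli_strings (list of strings): a list of Pauli strings
--
--     """
--
--     # Initialize Pauli letter list and string list
--     pauli_list = ["", "X", "Y", "Z"]
--     current_list = ["["]
--
--     # Recursively build elements in list
--     for qubit_index in range(number_of_qubits):
--         new_list = []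
--         for j, term in enumerate(current_list):
--             for pauli in pauli_list:
--                 # Append letter and index if non-trivial
--                 if pauli:
--                     new_list.append(term+pauli+f"{qubit_index}"+" ")
--                 else:
--                     new_list.append(term+" ")
--
--             current_list = new_list
--
--     # Replace final space with bracket
--     final_list = []
--     for j, term in enumerate(current_list):
--         final_list.append(term[:-1]+"]")
--
--     return final_list
-- ===== SOURCE B (Python) =====
-- def create_list_of_full_weight_paulis(number_of_qubits):
--     """Creates a list of Pauli strings for a specified qubit number.
--
--     Enumerates all 4**n combinations directly: each index k in
--     range(4**n) is read as an n-digit base-4 number (most significant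
--     digit = qubit 0), and the corresponding string is built in one pass.
--     """
--     n = number_of_qubits if number_of_qubits > 0 else 0
--     result = []
--     for k in range(4 ** n):
--         s = "["
--         for i in range(n):
--             d = k // 4 ** (n - 1 - i) % 4
--             if d == 0:
--                 s += " "
--             elif d == 1:
--                 s += "X" + str(i) + " "
--             elif d == 2:
--                 s += "Y" + str(i) + " "
--             else:
--                 s += "Z" + str(i) + " "
--         result.append(s[:-1] + "]")
--     return result
-- ===== Notes on version B (the rewrite author's own statement) =====
-- stated objective: alternative
-- what changed: Replaces the n-level iterative rebuilding of ever-longer prefix lists with a single direct enumeration: each k in range(4**n) is decoded as an n-digit base-4 number and its Pauli string is built in one pass, with no intermediate level lists.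
import Mathlib
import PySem

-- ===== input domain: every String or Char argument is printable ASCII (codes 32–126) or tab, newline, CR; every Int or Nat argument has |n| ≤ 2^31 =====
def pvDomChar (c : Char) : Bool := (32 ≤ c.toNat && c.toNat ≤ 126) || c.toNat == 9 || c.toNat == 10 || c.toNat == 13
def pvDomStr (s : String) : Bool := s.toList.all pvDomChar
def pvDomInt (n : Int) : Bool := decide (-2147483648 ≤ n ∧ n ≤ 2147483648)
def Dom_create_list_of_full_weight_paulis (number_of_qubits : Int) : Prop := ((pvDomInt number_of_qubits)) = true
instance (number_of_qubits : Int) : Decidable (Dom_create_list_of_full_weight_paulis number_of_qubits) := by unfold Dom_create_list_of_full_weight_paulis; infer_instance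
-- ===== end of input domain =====

-- B enumerates the 4^n combinations directly (each k in range(4^n) decoded as an
-- n-digit base-4 number, one string built per k) instead of A's n-level rebuilding
-- of ever-longer prefix lists; same asymptotic cost (objective: alternative).

-- ===== PORT A =====
def create_list_of_full_weight_paulis (number_of_qubits : Int) : List String :=
  let pauli_list : List String := ["", "X", "Y", "Z"]
  let current_list : List String := ["["]
  -- for qubit_index in range(number_of_qubits): … ; Python reassigns current_list
  -- after every term of the middle loop, so the state is (new_list, current_list)
  let current_list :=
    (PySem.List.pyRange 0 number_of_qubits).foldl (fun cur qubit_index =>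
      (cur.foldl (fun (st : List String × List String) term =>
        let nl := pauli_list.foldl (fun nl pauli =>
          if pauli ≠ "" then nl ++ [term ++ pauli ++ PySem.Int.toStr qubit_index ++ " "]
          else nl ++ [term ++ " "]) st.1
        (nl, nl)) (([] : List String), cur)).2) current_list
  -- final_list: term[:-1] + "]"
  current_list.foldl (fun fl term => fl ++ [PySem.Str.slice term none (some (-1)) ++ "]"]) []

-- ===== PORT B =====
def create_list_of_full_weight_paulis_alt (number_of_qubits : Int) : List String :=
  let n : Int := if number_of_qubits > 0 then number_of_qubits else 0
  -- Python's 4 ** e : both exponents (n and n-1-i, with i in range(n)) are ≥ 0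
  -- wherever they are evaluated, so Int ^ (·).toNat is exact here
  (PySem.List.pyRange 0 ((4:Int) ^ n.toNat)).foldl (fun result k =>
    let s := (PySem.List.pyRange 0 n).foldl (fun s i =>
      let d := PySem.Int.mod (PySem.Int.floordiv k ((4:Int) ^ (n - 1 - i).toNat)) 4
      if d = 0 then s ++ " "
      else if d = 1 then s ++ "X" ++ PySem.Int.toStr i ++ " "
      else if d = 2 then s ++ "Y" ++ PySem.Int.toStr i ++ " "
      else s ++ "Z" ++ PySem.Int.toStr i ++ " ") "["
    result ++ [PySem.Str.slice s none (some (-1)) ++ "]"]) []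

-- ===== PRECONDITION & SPEC =====
def Spec_create_list_of_full_weight_paulis (number_of_qubits : Int) (out : List String) : Prop := out = create_list_of_full_weight_paulis_alt number_of_qubits
instance (number_of_qubits : Int) (out : List String) : Decidable (Spec_create_list_of_full_weight_paulis number_of_qubits out) := by unfold Spec_create_list_of_full_weight_paulis; infer_instance

-- ===== CLAIM (what is proved, stated in full; the proofs are below) =====
def Claim_equal_create_list_of_full_weight_paulis : Prop := ∀ (number_of_qubits : Int), Dom_create_list_of_full_weight_paulis number_of_qubits → Spec_create_list_of_full_weight_paulis number_of_qubits (create_list_of_full_weight_paulis number_of_qubits)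

-- ===== LEMMAS AND PROOFS =====

-- the chunk appended for qubit i with base-4 digit d (0 ↦ identity, 1/2/3 ↦ X/Y/Z)
def pvPiece (i d : Nat) : String :=
  if d = 0 then " "
  else (if d = 1 then "X" else if d = 2 then "Y" else "Z") ++ PySem.Int.toStr (i:Int) ++ " "

-- digit sequences (msb first) of length m, in A's enumeration order
def pvCombos : Nat → List (List Nat)
  | 0 => [[]]
  | m + 1 => (pvCombos m).flatMap (fun ds => [ds ++ [0], ds ++ [1], ds ++ [2], ds ++ [3]])

-- the pre-trim string of a digit sequence
def pvRender (ds : List Nat) : String :=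
  (List.range ds.length).foldl (fun s i => s ++ pvPiece i (ds.getD i 0)) "["

-- digits of k as an m-digit base-4 number, msb first
def pvDigits (m k : Nat) : List Nat := (List.range m).map (fun i => k / 4 ^ (m - 1 - i) % 4)

lemma pvRange_four (t : Nat) : List.range (4*t) = (List.range t).flatMap (fun j => [4*j, 4*j+1, 4*j+2, 4*j+3]) := by
  induction t with
  | zero => simp
  | succ t ih =>
    have h : 4*(t+1) = (4*t)+1+1+1+1 := by ring
    rw [h, List.range_succ, List.range_succ, List.range_succ, List.range_succ, ih, List.range_succ]
    simp [List.flatMap_append, List.append_assoc]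

lemma pvDigits_succ (m j d : Nat) (hd : d < 4) :
    pvDigits (m+1) (4*j+d) = pvDigits m j ++ [d] := by
  unfold pvDigits
  rw [List.range_succ, List.map_append]
  congr 1
  · apply List.map_congr_left
    intro i hi
    have him : i < m := List.mem_range.mp hi
    have he : m + 1 - 1 - i = (m - 1 - i) + 1 := by omega
    rw [he, pow_succ', ← Nat.div_div_eq_div_mul]
    have h4 : (4*j+d)/4 = j := by omega
    rw [h4]
  · simp
    omega

lemma pvCombos_eq (m : Nat) : pvCombos m = (List.range (4 ^ m)).map (pvDigits m) := by
  induction m with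
  | zero => simp [pvCombos, pvDigits]
  | succ m ih =>
    have h4 : 4 ^ (m+1) = 4 * 4 ^ m := by ring
    rw [pvCombos, ih, h4, pvRange_four, List.map_flatMap, List.flatMap_map]
    apply List.flatMap_congr
    intro j hj
    simp only [List.map_cons, List.map_nil]
    rw [show (4*j : Nat) = 4*j+0 by omega]
    rw [pvDigits_succ m j 0 (by omega), pvDigits_succ m j 1 (by omega),
        pvDigits_succ m j 2 (by omega), pvDigits_succ m j 3 (by omega)]

lemma pvCombos_length (m : Nat) (ds : List Nat) (h : ds ∈ pvCombos m) : ds.length = m := by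
  induction m generalizing ds with
  | zero => simp [pvCombos] at h; simp [h]
  | succ m ih =>
    rw [pvCombos, List.mem_flatMap] at h
    obtain ⟨es, hes, hds⟩ := h
    have := ih es hes
    simp at hds
    rcases hds with h|h|h|h <;> simp [h, this]

lemma pvCombos_ne_nil (m : Nat) : pvCombos m ≠ [] := by
  induction m with
  | zero => simp [pvCombos]
  | succ m ih =>
    rw [pvCombos]
    simp [List.flatMap_eq_nil_iff]
    exact List.exists_mem_of_ne_nil _ ih

lemma pvRender_append (ds : List Nat) (d : Nat) :
    pvRender (ds ++ [d]) = pvRender ds ++ pvPiece ds.length d := by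
  unfold pvRender
  rw [List.length_append, List.length_cons, List.length_nil, List.range_succ, List.foldl_append]
  simp only [List.foldl_cons, List.foldl_nil]
  congr 1
  · apply PySem.List.foldl_congr_mem
    intro acc i hi
    have : i < ds.length := List.mem_range.mp hi
    simp [List.getD, List.getElem?_append, this]
  · congr 1
    simp [List.getD]

lemma pvPauliFold (q : Int) (acc : List String) (term : String) :
    (["", "X", "Y", "Z"] : List String).foldl (fun nl pauli =>
        if pauli ≠ "" then nl ++ [term ++ pauli ++ PySem.Int.toStr q ++ " "]
        else nl ++ [term ++ " "]) acc
    = acc ++ [term ++ " ", term ++ "X" ++ PySem.Int.toStr q ++ " ",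
        term ++ "Y" ++ PySem.Int.toStr q ++ " ", term ++ "Z" ++ PySem.Int.toStr q ++ " "] := by
  simp [List.foldl_cons, List.foldl_nil]

lemma pvPairFold (e : String → List String) (t : List String) (acc b : List String) :
    (t.foldl (fun st term => (st.1 ++ e term, st.1 ++ e term)) (acc, b)).2
      = if t.isEmpty then b else acc ++ t.flatMap e := by
  induction t generalizing acc b with
  | nil => simp
  | cons x t ih =>
    simp only [List.foldl_cons, ih]
    by_cases h : t.isEmpty
    · have : t = [] := List.isEmpty_iff.mp h
      simp [this]
    · simp [h, List.append_assoc]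

lemma pvA_levels (m : Nat) :
    (PySem.List.pyRange 0 (m:Int)).foldl (fun cur qubit_index =>
      (cur.foldl (fun (st : List String × List String) term =>
        let nl := (["", "X", "Y", "Z"] : List String).foldl (fun nl pauli =>
          if pauli ≠ "" then nl ++ [term ++ pauli ++ PySem.Int.toStr qubit_index ++ " "]
          else nl ++ [term ++ " "]) st.1
        (nl, nl)) (([] : List String), cur)).2) ["["]
    = (pvCombos m).map pvRender := by
  induction m with
  | zero =>
    simp [pvCombos, pvRender]
  | succ m ih =>
    have hc : ((m+1 : Nat) : Int) = (m : Int) + 1 := by push_cast; ring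
    rw [hc, PySem.List.pyRange_one_succ_right (by positivity), List.foldl_append, ih]
    simp only [pvPauliFold]
    simp only [List.foldl_cons, List.foldl_nil]
    rw [pvPairFold (fun term => [term ++ " ", term ++ "X" ++ PySem.Int.toStr (m:Int) ++ " ",
        term ++ "Y" ++ PySem.Int.toStr (m:Int) ++ " ", term ++ "Z" ++ PySem.Int.toStr (m:Int) ++ " "])]
    have hne : (pvCombos m).map pvRender ≠ [] := by
      simp [List.map_eq_nil_iff]; exact pvCombos_ne_nil m
    rw [if_neg (by simpa [List.isEmpty_iff] using hne)]
    rw [List.nil_append, List.flatMap_map]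
    rw [show pvCombos (m+1) = (pvCombos m).flatMap
          (fun ds => [ds ++ [0], ds ++ [1], ds ++ [2], ds ++ [3]]) from rfl,
        List.map_flatMap]
    apply List.flatMap_congr
    intro ds hds
    have hlen : ds.length = m := pvCombos_length m ds hds
    simp only [List.map_cons, List.map_nil, pvRender_append, hlen, pvPiece]
    norm_num [String.append_assoc]

lemma pvB_strings (m k : Nat) :
    (PySem.List.pyRange 0 (m:Int)).foldl (fun s i =>
      let d := PySem.Int.mod (PySem.Int.floordiv (k:Int) ((4:Int) ^ ((m:Int) - 1 - i).toNat)) 4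
      if d = 0 then s ++ " "
      else if d = 1 then s ++ "X" ++ PySem.Int.toStr i ++ " "
      else if d = 2 then s ++ "Y" ++ PySem.Int.toStr i ++ " "
      else s ++ "Z" ++ PySem.Int.toStr i ++ " ") "["
    = pvRender (pvDigits m k) := by
  rw [PySem.List.pyRange_zero_natCast, List.foldl_map]
  unfold pvRender
  rw [show (pvDigits m k).length = m by simp [pvDigits]]
  apply PySem.List.foldl_congr_mem
  intro acc i hi
  have him : i < m := List.mem_range.mp hi
  have he : ((m:Int) - 1 - (i:Int)).toNat = m - 1 - i := by omega
  rw [he]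
  have hfd : PySem.Int.floordiv ((k:Nat):Int) ((4:Int) ^ (m - 1 - i)) = ((k / 4 ^ (m - 1 - i) : Nat) : Int) := by
    have hp : ((4:Int) ^ (m - 1 - i)) = (((4:Nat) ^ (m - 1 - i) : Nat) : Int) := by push_cast; ring
    rw [hp, PySem.Int.floordiv_natCast]
  have hmd : PySem.Int.mod ((k / 4 ^ (m - 1 - i) : Nat) : Int) 4 = ((k / 4 ^ (m - 1 - i) % 4 : Nat) : Int) := by
    exact_mod_cast PySem.Int.mod_natCast (k / 4 ^ (m - 1 - i)) 4
  simp only [hfd, hmd]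
  have hg : (pvDigits m k).getD i 0 = k / 4 ^ (m - 1 - i) % 4 := by
    simp [pvDigits, List.getD, him]
  rw [hg]
  have hlt : k / 4 ^ (m - 1 - i) % 4 < 4 := Nat.mod_lt _ (by norm_num)
  set dn := k / 4 ^ (m - 1 - i) % 4 with hdn
  clear_value dn
  interval_cases dn <;> simp [pvPiece, String.append_assoc]

lemma pv_main_eq (n : Int) :
    create_list_of_full_weight_paulis n = create_list_of_full_weight_paulis_alt n := by
  set m : Nat := n.toNat with hm
  have hn' : (if n > 0 then n else 0) = (m : Int) := by
    split_ifs with h <;> omega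
  have hrange : PySem.List.pyRange 0 n = PySem.List.pyRange 0 (m : Int) := by
    by_cases h : 0 < n
    · congr 1; omega
    · rw [PySem.List.pyRange_one_eq_nil (by omega), PySem.List.pyRange_one_eq_nil (by omega)]
  unfold create_list_of_full_weight_paulis create_list_of_full_weight_paulis_alt
  simp only [hn', hrange]
  rw [pvA_levels m]
  rw [PySem.List.foldl_append_singleton_eq_map, List.nil_append]
  have hpow : ((4:Int) ^ ((m:Int)).toNat) = (((4:Nat) ^ m : Nat) : Int) := by
    rw [Int.toNat_natCast]; push_cast; ring
  rw [hpow, PySem.List.pyRange_zero_natCast (4^m)]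
  rw [PySem.List.foldl_append_singleton_eq_map, List.nil_append]
  rw [List.map_map, List.map_map, pvCombos_eq, List.map_map]
  apply List.map_congr_left
  intro j hj
  simp only [Function.comp]
  rw [pvB_strings m j]

-- ===== VERDICT (by name: the statement is the Claim_ definition above) =====
theorem create_list_of_full_weight_paulis_spec : Claim_equal_create_list_of_full_weight_paulis := by
  intro n _
  unfold Spec_create_list_of_full_weight_paulis
  exact pv_main_eq n
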